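-- pv_equiv track=rewrite | github.com/JonasFiechter/Challenges | python/cassino_security_2.py | security_
-- ===== SOURCE A (Python) =====
-- def security_(cassino_str):
--     thief_sight = False
--     money_sight = False
--     for char in cassino_str:
--         if char == 'T':
--             thief_sight = True
--         elif char == '$':
--             money_sight = True
--
--         if money_sight and thief_sight:
--             return "ALARM!"
--
--         elif char == 'G':
--             money_sight = False
--             thief_sight = False
--
--     return "Safe"
-- ===== SOURCE B (Python) =====
-- def security_(cassino_str):
--     for segment in cassino_str.split('G'):
--         if 'T' in segment and '$' in segment:
--             return "ALARM!"
--     return "Safe"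
-- ===== Notes on version B (the rewrite author's own statement) =====
-- stated objective: simpler
-- what changed: Replaces the stateful two-flag character scan with a split on the reset character followed by a per-segment membership check for the two sought characters.
import Mathlib
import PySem

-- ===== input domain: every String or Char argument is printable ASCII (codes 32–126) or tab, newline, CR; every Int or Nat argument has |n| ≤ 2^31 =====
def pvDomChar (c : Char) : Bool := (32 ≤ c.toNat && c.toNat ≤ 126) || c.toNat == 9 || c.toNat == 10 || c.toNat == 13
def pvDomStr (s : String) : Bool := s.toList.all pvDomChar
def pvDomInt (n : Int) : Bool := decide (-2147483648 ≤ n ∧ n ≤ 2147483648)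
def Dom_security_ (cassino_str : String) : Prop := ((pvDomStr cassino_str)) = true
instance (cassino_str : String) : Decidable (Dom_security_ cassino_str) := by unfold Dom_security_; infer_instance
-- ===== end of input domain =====

-- B replaces A's stateful two-flag linear scan with split-on-'G' plus a per-segment membership check (simpler; a timing run measured it faster by a constant factor).


-- ===== PORT A =====
-- the for-loop over the characters, carrying the two flags (thief_sight, money_sight)
def securityLoopA : List Char → Bool → Bool → String
  | [], _, _ => "Safe"
  | c :: rest, thief, money =>
    let thief' := if c == 'T' then true else thief
    let money' := if c == 'T' then money else if c == '$' then true else money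
    if money' && thief' then "ALARM!"
    else if c == 'G' then securityLoopA rest false false
    else securityLoopA rest thief' money'

def security_ (cassino_str : String) : String :=
  securityLoopA cassino_str.toList false false

-- ===== PORT B =====
-- the for-loop over the segments of cassino_str.split('G')
def securityLoopB : List (List Char) → String
  | [] => "Safe"
  | seg :: rest =>
    if PySem.Chars.isIn ['T'] seg && PySem.Chars.isIn ['$'] seg then "ALARM!"
    else securityLoopB rest

def security__alt (cassino_str : String) : String :=
  securityLoopB (PySem.Chars.splitOn cassino_str.toList ['G'])

-- ===== PRECONDITION & SPEC =====
def Spec_security_ (cassino_str : String) (out : String) : Prop := out = security__alt cassino_str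
instance (cassino_str : String) (out : String) : Decidable (Spec_security_ cassino_str out) := by unfold Spec_security_; infer_instance

-- ===== CLAIM (what is proved, stated in full; the proofs are below) =====
def Claim_equal_security_ : Prop := ∀ (cassino_str : String), Dom_security_ cassino_str → Spec_security_ cassino_str (security_ cassino_str)

-- ===== LEMMAS AND PROOFS =====

-- PySem's splitOn with a single-character separator is Mathlib's List.splitOn
lemma splitOn_go_spec (g : Char) (fuel : Nat) : ∀ (l cur : List Char) (acc : List (List Char)),
    l.length ≤ fuel →
    PySem.Chars.splitOn.go [g] fuel l cur acc
      = acc.reverse ++ (l.splitOn g).modifyHead (fun seg => cur.reverse ++ seg) := by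
  induction fuel with
  | zero =>
    intro l cur acc h
    have hl : l = [] := by cases l <;> simp_all
    subst hl
    simp [PySem.Chars.splitOn.go, List.splitOn]
  | succ n ih =>
    intro l cur acc h
    cases l with
    | nil => simp [PySem.Chars.splitOn.go, List.splitOn]
    | cons c rest =>
      rw [PySem.Chars.splitOn.go]
      by_cases hc : c = g
      · subst hc
        rw [if_pos (by simp)]
        simp only [List.length_cons, List.length_nil, List.drop_succ_cons, List.drop_zero]
        rw [ih rest [] (cur.reverse :: acc) (by simpa using h)]
        simp only [List.splitOn, List.splitOnP_cons, BEq.rfl, if_true, List.modifyHead,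
          List.reverse_cons, List.append_assoc, List.singleton_append, List.nil_append,
          List.reverse_nil]
        cases List.splitOnP (fun x => x == c) rest <;> simp
      · rw [if_neg (by simp [List.isPrefixOf]; exact fun h' => hc h'.symm)]
        rw [ih rest (c :: cur) acc (by simpa using h)]
        have hbc : (c == g) = false := by simpa using hc
        simp [List.splitOn, List.splitOnP_cons, hbc, List.modifyHead_modifyHead,
          Function.comp_def]

lemma splitOn_bridge (l : List Char) (g : Char) :
    PySem.Chars.splitOn l [g] = l.splitOn g := by
  rw [PySem.Chars.splitOn, splitOn_go_spec g (l.length + 1) l [] [] (by omega)]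
  cases h : l.splitOn g with
  | nil => exact absurd h (by simp [List.splitOn]; exact List.splitOnP_ne_nil _ _)
  | cons a t => simp

-- single-character 'in' is membership
lemma isIn_singleton (c : Char) (l : List Char) :
    PySem.Chars.isIn [c] l = decide (c ∈ l) := by
  by_cases h : c ∈ l
  · simp [h, PySem.Chars.isIn_iff_infix, List.singleton_infix_iff]
  · simp only [h, decide_false]
    rw [PySem.Chars.isIn_eq_false_iff, List.singleton_infix_iff]
    exact h

-- proof-side segment checker: B's loop with the incoming flags credited to the first segment
def segsB : List (List Char) → Bool → Bool → String
  | [], _, _ => "Safe"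
  | seg :: rest, t, m =>
    if (t || decide ('T' ∈ seg)) && (m || decide ('$' ∈ seg)) then "ALARM!"
    else segsB rest false false

lemma segsB_eq_loopB : ∀ segs : List (List Char), segsB segs false false = securityLoopB segs := by
  intro segs
  induction segs with
  | nil => rfl
  | cons seg rest ih =>
    simp only [segsB, securityLoopB, Bool.false_or, isIn_singleton, ih]

lemma splitOn_exists_cons (l : List Char) (g : Char) :
    ∃ seg segs, l.splitOn g = seg :: segs := by
  cases hx : l.splitOn g with
  | nil => exact absurd hx (by simp [List.splitOn]; exact List.splitOnP_ne_nil _ _)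
  | cons a t => exact ⟨a, t, rfl⟩

-- the core invariant: A's scan with flags (t, m), never both set, equals B's segment check
lemma loop_invariant : ∀ (cs : List Char) (t m : Bool), ¬ (t = true ∧ m = true) →
    securityLoopA cs t m = segsB (cs.splitOn 'G') t m := by
  intro cs
  induction cs with
  | nil =>
    intro t m h
    simp only [securityLoopA, List.splitOn, List.splitOnP_nil, segsB]
    rcases Bool.eq_false_or_eq_true t with ht | ht <;>
      rcases Bool.eq_false_or_eq_true m with hm | hm <;> simp_all
  | cons c rest ih =>
    intro t m h
    have hsplit : (c :: rest).splitOn 'G'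
        = if c == 'G' then [] :: rest.splitOn 'G' else (rest.splitOn 'G').modifyHead (c :: ·) := by
      simp [List.splitOn, List.splitOnP_cons]
    by_cases hG : c = 'G'
    · subst hG
      simp only [securityLoopA]
      have h1 : (('G' : Char) == 'T') = false := by decide
      have h2 : (('G' : Char) == '$') = false := by decide
      simp only [h1, h2, if_false]
      have hm : (m && t) = false := by
        rcases Bool.eq_false_or_eq_true t with ht | ht <;>
          rcases Bool.eq_false_or_eq_true m with hmm | hmm <;> simp_all
      rw [if_neg (by simp [hm]), if_pos (by simp)]
      rw [ih false false (by simp), hsplit, if_pos (by simp)]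
      simp only [segsB]
      rw [if_neg (by
        simp only [List.not_mem_nil, decide_false, Bool.or_false]
        exact fun hx => h ⟨(Bool.and_eq_true_iff.mp hx).1, (Bool.and_eq_true_iff.mp hx).2⟩)]
    · rw [hsplit, if_neg (by simp [hG])]
      obtain ⟨seg, segs, hrec⟩ := splitOn_exists_cons rest 'G'
      rw [hrec]
      simp only [List.modifyHead]
      simp only [securityLoopA]
      set t' := if c == 'T' then true else t with ht'
      set m' := if c == 'T' then m else if c == '$' then true else m with hm'
      have htt : t' = (t || decide (c = 'T')) := by
        by_cases hcT : c = 'T' <;> simp [ht', hcT]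
      have hmm : m' = (m || decide (c = '$')) := by
        by_cases hcD : c = '$'
        · have : (c == 'T') = false := by subst hcD; decide
          simp [hm', this, hcD]
        · by_cases hcT : c = 'T' <;> simp [hm', hcT, hcD]
      have hT : (t' || decide ('T' ∈ seg)) = (t || decide ('T' ∈ c :: seg)) := by
        rw [htt]
        by_cases hcT : c = 'T'
        · simp [hcT, List.mem_cons]
        · have hne : ¬ ('T' = c) := fun hx => hcT hx.symm
          simp [List.mem_cons, hcT, hne]
      have hD : (m' || decide ('$' ∈ seg)) = (m || decide ('$' ∈ c :: seg)) := by
        rw [hmm]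
        by_cases hcD : c = '$'
        · simp [hcD, List.mem_cons]
        · have hne : ¬ ('$' = c) := fun hx => hcD hx.symm
          simp [List.mem_cons, hcD, hne]
      by_cases hboth : (m' && t') = true
      · rw [if_pos hboth]
        simp only [segsB]
        rw [if_pos ?_]
        obtain ⟨hm1, ht1⟩ := Bool.and_eq_true_iff.mp hboth
        rw [Bool.and_eq_true]
        exact ⟨by rw [← hT]; simp [ht1], by rw [← hD]; simp [hm1]⟩
      · rw [if_neg hboth, if_neg (by simp [hG])]
        rw [ih t' m' (fun hx => hboth (by simp [hx.1, hx.2])), hrec]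
        simp only [segsB, hT, hD]

-- ===== VERDICT (by name: the statement is the Claim_ definition above) =====
theorem security__spec : Claim_equal_security_ := by
  intro s _
  unfold Spec_security_ security_ security__alt
  rw [splitOn_bridge, loop_invariant s.toList false false (by simp),
    segsB_eq_loopB]
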